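-- pv_equiv track=rewrite | github.com/jaysooo/Algorithm | problem-solving/baekjoon/Baekjoon4659/main.py | valid_check_case2
-- ===== SOURCE A (Python) =====
-- vowel = ['a','e','i','o','u']
--
-- def is_vowel(c):
--     if c in vowel:
--         return True
--     else:
--         return False
--
-- def valid_check_case2(s):
--     end = len(s)
--     valid = True
--     if end >2:
--         start = 2
--         while(start < end):
--             if is_vowel(s[start]) and is_vowel(s[start-1]) and is_vowel(s[start-2]):
--                 valid = False
--                 break
--             elif not is_vowel(s[start]) and not is_vowel(s[start-1]) and not is_vowel(s[start-2]):
--                 valid = False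
--                 break
--             else:
--                 start +=1
--     return valid
-- ===== SOURCE B (Python) =====
-- VOWELS = {'a', 'e', 'i', 'o', 'u'}
--
-- def valid_check_case2(s):
--     if not s:
--         return True
--     run = 1
--     prev = s[0] in VOWELS
--     for c in s[1:]:
--         t = c in VOWELS
--         if t == prev:
--             run += 1
--         else:
--             run = 1
--         if run >= 3:
--             return False
--         prev = t
--     return True
-- ===== Notes on version B (the rewrite author's own statement) =====
-- stated objective: simpler
-- what changed: Replaces A's index-based while loop that re-tests a sliding width-3 window (three is_vowel calls per position) with a single forward pass maintaining a run-length counter of same-type characters, returning False as soon as the run reaches 3.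
import Mathlib
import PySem

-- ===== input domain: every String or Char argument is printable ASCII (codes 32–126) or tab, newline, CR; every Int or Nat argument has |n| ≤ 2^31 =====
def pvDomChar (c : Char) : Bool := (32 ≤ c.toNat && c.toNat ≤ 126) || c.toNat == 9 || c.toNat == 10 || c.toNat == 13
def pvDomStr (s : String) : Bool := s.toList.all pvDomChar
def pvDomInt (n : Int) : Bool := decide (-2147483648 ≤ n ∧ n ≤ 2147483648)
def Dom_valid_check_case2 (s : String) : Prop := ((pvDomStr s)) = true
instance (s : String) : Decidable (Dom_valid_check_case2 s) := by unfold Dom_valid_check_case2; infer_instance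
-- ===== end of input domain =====

-- B replaces A's sliding width-3 window re-test with a single pass keeping a run-length
-- counter of same-type characters (objective: simpler).

-- ===== PORT A =====
-- vowel = ['a','e','i','o','u']
def pvVowelList : List Char := ['a', 'e', 'i', 'o', 'u']

def pv_is_vowel (c : Char) : Bool :=
  if pvVowelList.contains c then true else false

-- the while loop of A; `start` runs from 2 to `endn - 1`; `s[start]` etc. are always
-- in range there (2 ≤ start < endn = length), so `getD` with a dummy default is exact
def pvLoopA (chars : List Char) (endn start : Nat) : Bool :=
  if start < endn then
    if pv_is_vowel (chars.getD start ' ') && pv_is_vowel (chars.getD (start - 1) ' ')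
        && pv_is_vowel (chars.getD (start - 2) ' ') then
      false
    else if !pv_is_vowel (chars.getD start ' ') && !pv_is_vowel (chars.getD (start - 1) ' ')
        && !pv_is_vowel (chars.getD (start - 2) ' ') then
      false
    else
      pvLoopA chars endn (start + 1)
  else
    true
termination_by endn - start

def valid_check_case2 (s : String) : Bool :=
  let endn := s.toList.length
  if endn > 2 then pvLoopA s.toList endn 2 else true

-- ===== PORT B =====
-- VOWELS = {'a','e','i','o','u'} : a set of five distinct chars; membership = contains
def pvVowelsB : List Char := ['a', 'e', 'i', 'o', 'u']

def pvIsVB (c : Char) : Bool := pvVowelsB.contains c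

-- the for loop of B: run-length counter over the remaining characters
def pvRunLoop (run : Nat) (prev : Bool) (rest : List Char) : Bool :=
  match rest with
  | [] => true
  | c :: cs =>
    let t := pvIsVB c
    let run' := if t == prev then run + 1 else 1
    if run' ≥ 3 then false else pvRunLoop run' t cs

def valid_check_case2_alt (s : String) : Bool :=
  match s.toList with
  | [] => true
  | c :: cs => pvRunLoop 1 (pvIsVB c) cs

-- ===== PRECONDITION & SPEC =====
def Spec_valid_check_case2 (s : String) (out : Bool) : Prop := out = valid_check_case2_alt s
instance (s : String) (out : Bool) : Decidable (Spec_valid_check_case2 s out) := by unfold Spec_valid_check_case2; infer_instance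

-- ===== CLAIM (what is proved, stated in full; the proofs are below) =====
def Claim_equal_valid_check_case2 : Prop := ∀ (s : String), Dom_valid_check_case2 s → Spec_valid_check_case2 s (valid_check_case2 s)

-- ===== LEMMAS AND PROOFS =====

-- reference predicate: no three consecutive characters of the same type
def pvNoTriple (l : List Char) : Bool :=
  match l with
  | a :: b :: c :: rest =>
    if (pvIsVB a == pvIsVB b) && (pvIsVB b == pvIsVB c) then false
    else pvNoTriple (b :: c :: rest)
  | _ => true

theorem pvIsV_eq (c : Char) : pv_is_vowel c = pvIsVB c := by
  simp [pv_is_vowel, pvIsVB, pvVowelList, pvVowelsB]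

theorem pvNoTriple_short (l : List Char) (h : l.length ≤ 2) : pvNoTriple l = true := by
  match l with
  | [] => rfl
  | [_] => rfl
  | [_, _] => rfl
  | _ :: _ :: _ :: _ => simp at h

-- A's loop, started at index k+2, decides "no triple" on the suffix from k
theorem pvLoopA_eq (l : List Char) (k : Nat) :
    pvLoopA l l.length (k + 2) = pvNoTriple (l.drop k) := by
  by_cases h : k + 2 < l.length
  · have hk : k < l.length := by omega
    have hk1 : k + 1 < l.length := by omega
    have hd0 : l.drop k = l[k] :: l.drop (k + 1) := List.drop_eq_getElem_cons hk
    have hd1 : l.drop (k + 1) = l[k + 1] :: l.drop (k + 2) := List.drop_eq_getElem_cons hk1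
    have hd2 : l.drop (k + 2) = l[k + 2] :: l.drop (k + 3) := List.drop_eq_getElem_cons h
    have hga : l.getD k ' ' = l[k] := by simp [List.getD, List.getElem?_eq_getElem hk]
    have hgb : l.getD (k + 1) ' ' = l[k + 1] := by
      simp [List.getD, List.getElem?_eq_getElem hk1]
    have hgc : l.getD (k + 2) ' ' = l[k + 2] := by
      simp [List.getD, List.getElem?_eq_getElem h]
    have hrec : pvLoopA l l.length (k + 2 + 1) = pvNoTriple (l.drop (k + 1)) := by
      have := pvLoopA_eq l (k + 1)
      simpa using this
    rw [pvLoopA]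
    simp only [if_pos h]
    have h2 : k + 2 - 1 = k + 1 := by omega
    have h3 : k + 2 - 2 = k := by omega
    rw [h2, h3, hga, hgb, hgc, hd0, hd1, hd2, pvNoTriple]
    rw [hd1, hd2] at hrec
    rw [pvIsV_eq, pvIsV_eq, pvIsV_eq]
    cases hva : pvIsVB l[k] <;> cases hvb : pvIsVB l[k + 1] <;>
      cases hvc : pvIsVB l[k + 2] <;> simp [hrec]
  · rw [pvLoopA]
    simp only [if_neg h]
    have : (l.drop k).length ≤ 2 := by
      simp [List.length_drop]; omega
    rw [pvNoTriple_short _ this]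
termination_by l.length - k

-- dropping the head does not matter when the first two types differ
theorem pvNoTriple_cons_ne (a b : Char) (cs : List Char) (h : pvIsVB a ≠ pvIsVB b) :
    pvNoTriple (a :: b :: cs) = pvNoTriple (b :: cs) := by
  match cs with
  | [] => rfl
  | c :: rest =>
    rw [pvNoTriple]
    simp [h]

-- B's run loop vs. the reference predicate (mutual invariant for run = 1 and run = 2)
theorem pvRunLoop_eq (n : Nat) : ∀ cs : List Char, cs.length = n →
    (∀ a : Char, pvRunLoop 1 (pvIsVB a) cs = pvNoTriple (a :: cs)) ∧
    (∀ a b : Char, pvIsVB a = pvIsVB b →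
      pvRunLoop 2 (pvIsVB b) cs = pvNoTriple (a :: b :: cs)) := by
  induction n using Nat.strong_induction_on with
  | _ n ih =>
    intro cs hlen
    constructor
    · intro a
      match cs with
      | [] => rfl
      | c :: rest =>
        have hrest : rest.length < n := by simp at hlen; omega
        rw [pvRunLoop]
        by_cases hv : pvIsVB c = pvIsVB a
        · have := (ih rest.length hrest rest rfl).2 a c hv.symm
          simpa [hv] using this
        · have h1 := (ih rest.length hrest rest rfl).1 c
          have hne : pvIsVB a ≠ pvIsVB c := fun h => hv h.symm
          rw [pvNoTriple_cons_ne a c rest hne]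
          simpa [hv] using h1
    · intro a b hab
      match cs with
      | [] => rfl
      | c :: rest =>
        have hrest : rest.length < n := by simp at hlen; omega
        rw [pvRunLoop, pvNoTriple]
        by_cases hv : pvIsVB c = pvIsVB b
        · simp [hv, hab]
        · have h1 := (ih rest.length hrest rest rfl).1 c
          have hne : pvIsVB b ≠ pvIsVB c := fun h => hv h.symm
          rw [pvNoTriple_cons_ne b c rest hne]
          simp [hv, hne]
          exact h1

theorem alt_eq_noTriple (s : String) : valid_check_case2_alt s = pvNoTriple s.toList := by
  unfold valid_check_case2_alt
  match h : s.toList with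
  | [] => rfl
  | c :: cs => exact (pvRunLoop_eq cs.length cs rfl).1 c

theorem a_eq_noTriple (s : String) : valid_check_case2 s = pvNoTriple s.toList := by
  unfold valid_check_case2
  by_cases h : s.toList.length > 2
  · simp only [if_pos h]
    have := pvLoopA_eq s.toList 0
    simpa using this
  · simp only [if_neg h]
    rw [pvNoTriple_short _ (by omega)]

-- ===== VERDICT (by name: the statement is the Claim_ definition above) =====
theorem valid_check_case2_spec : Claim_equal_valid_check_case2 := by
  intro s _
  unfold Spec_valid_check_case2
  rw [a_eq_noTriple, alt_eq_noTriple]
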